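-- pv_equiv track=rewrite | github.com/valewnatalina/Politech | app.py | validar_lados_form
-- ===== SOURCE A (Python) =====
-- def validar_lados_form(form, quantidade_lados):
--     erros = []
--
--     for i in range(1, quantidade_lados + 1):
--         nome_ponto = form.get(f"nome_ponto_{i}", "").strip()
--         if not nome_ponto:
--             erros.append(f"O nome do ponto do lado {i} é obrigatório.")
--
--         try:
--             distancia = float(form.get(f"distancia_{i}", ""))
--             if distancia <= 0:
--                 erros.append(f"A distância do lado {i} deve ser maior que zero.")
--         except ValueError:
--             erros.append(f"Distância inválida no lado {i}.")
--
--         try: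
--             graus = int(form.get(f"angulo_graus_{i}", ""))
--             if graus < 0 or graus > 360:
--                 erros.append(f"Os graus do lado {i} devem estar entre 0 e 360.")
--         except ValueError:
--             erros.append(f"Graus inválidos no lado {i}.")
--
--         try:
--             minutos = int(form.get(f"angulo_minutos_{i}", ""))
--             if minutos < 0 or minutos > 59:
--                 erros.append(f"Os minutos do lado {i} devem estar entre 0 e 59.")
--         except ValueError:
--             erros.append(f"Minutos inválidos no lado {i}.")
--
--         try:
--             segundos = float(form.get(f"angulo_segundos_{i}", ""))
--             if segundos < 0 or segundos > 59:
--                 erros.append(f"Os segundos do lado {i} devem estar entre 0 e 59.")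
--         except ValueError:
--             erros.append(f"Segundos inválidos no lado {i}.")
--
--     return erros
-- ===== SOURCE B (Python) =====
-- # Staged re-implementation: each field kind is validated in its own pass over the
-- # sides (five column lists), then the columns are transposed (zip) and flattened
-- # side-major so the messages come out in A's order.
--
-- def _nome(form, i):
--     if not form.get(f"nome_ponto_{i}", "").strip():
--         return f"O nome do ponto do lado {i} \u00e9 obrigat\u00f3rio."
--     return None
--
--
-- def _dist(form, i):
--     try:
--         if float(form.get(f"distancia_{i}", "")) <= 0:
--             return f"A dist\u00e2ncia do lado {i} deve ser maior que zero."
--     except ValueError: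
--         return f"Dist\u00e2ncia inv\u00e1lida no lado {i}."
--     return None
--
--
-- def _graus(form, i):
--     try:
--         g = int(form.get(f"angulo_graus_{i}", ""))
--         if g < 0 or g > 360:
--             return f"Os graus do lado {i} devem estar entre 0 e 360."
--     except ValueError:
--         return f"Graus inv\u00e1lidos no lado {i}."
--     return None
--
--
-- def _minutos(form, i):
--     try:
--         m = int(form.get(f"angulo_minutos_{i}", ""))
--         if m < 0 or m > 59:
--             return f"Os minutos do lado {i} devem estar entre 0 e 59."
--     except ValueError:
--         return f"Minutos inv\u00e1lidos no lado {i}."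
--     return None
--
--
-- def _segundos(form, i):
--     try:
--         s = float(form.get(f"angulo_segundos_{i}", ""))
--         if s < 0 or s > 59:
--             return f"Os segundos do lado {i} devem estar entre 0 e 59."
--     except ValueError:
--         return f"Segundos inv\u00e1lidos no lado {i}."
--     return None
--
--
-- def validar_lados_form(form, quantidade_lados):
--     sides = range(1, quantidade_lados + 1)
--     cols = [[f(form, i) for i in sides]
--             for f in (_nome, _dist, _graus, _minutos, _segundos)]
--     erros = []
--     for row in zip(*cols):
--         erros.extend(m for m in row if m is not None)
--     return erros
-- ===== Notes on version B (the rewrite author's own statement) =====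
-- stated objective: alternative
-- what changed: Instead of one pass over the sides doing all five checks inline, B validates each field kind in its own separate pass over the sides, producing five Optional-message column lists, then transposes the columns (zip) and flattens side-major to recover A's message order.
import Mathlib
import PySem

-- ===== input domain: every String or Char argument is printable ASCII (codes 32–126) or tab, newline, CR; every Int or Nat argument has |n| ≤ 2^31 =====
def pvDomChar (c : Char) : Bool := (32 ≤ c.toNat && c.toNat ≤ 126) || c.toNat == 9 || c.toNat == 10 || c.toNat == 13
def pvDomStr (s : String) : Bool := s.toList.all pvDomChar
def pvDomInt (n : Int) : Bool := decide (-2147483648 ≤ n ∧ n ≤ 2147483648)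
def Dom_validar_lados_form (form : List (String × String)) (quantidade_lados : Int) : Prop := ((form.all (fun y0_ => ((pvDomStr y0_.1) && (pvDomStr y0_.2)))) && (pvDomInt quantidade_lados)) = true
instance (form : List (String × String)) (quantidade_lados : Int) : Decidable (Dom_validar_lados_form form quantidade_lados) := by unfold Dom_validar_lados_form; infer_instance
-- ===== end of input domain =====

-- B validates each field kind in its own pass over the sides (five column lists)
-- and then transposes/flattens side-major, instead of A's single pass doing all
-- five checks inline per side (objective: alternative decomposition).

-- ---- shared ports of Python BUILT-INS (dict.get and float(str)); both ports may use them ----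

-- form.get(key, "") : first-match lookup in the association list
def pvFget : List (String × String) → String → String
  | [], _ => ""
  | (k, v) :: t, key => if k == key then v else pvFget t key

-- Model of a CPython float as far as this program observes it: the program only
-- ever compares the parsed float with 0 and 59, so we keep NaN/±inf symbolically and
-- a finite double as the exact decimal rational it was parsed from; the two
-- comparison helpers below fold the binary64 round-to-nearest-even step into the
-- rational comparison exactly (thresholds 2^-1075 and 59 + 2^-48).
inductive PvPyFloat
  | nan | pinf | ninf | fin (q : ℚ)

def pvWsChar (c : Char) : Bool := c == ' ' || c == '\t' || c == '\n' || c == '\r' || c.toNat == 11 || c.toNat == 12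

def pvParseSign : List Char → Int × List Char
  | '+' :: t => (1, t)
  | '-' :: t => (-1, t)
  | cs => (1, cs)

-- a maximal run of digits/underscores is valid iff it has no leading/trailing '_' and no '__'
def pvNoDoubleUnd : List Char → Bool
  | '_' :: '_' :: _ => false
  | _ :: t => pvNoDoubleUnd t
  | [] => true

def pvCheckRun (r : List Char) : Option (List Char) :=
  if r.head? = some '_' ∨ r.getLast? = some '_' ∨ pvNoDoubleUnd r = false then none
  else some (r.filter (fun c => c ≠ '_'))

def pvDigitsVal (ds : List Char) : Int :=
  ds.foldl (fun a c => 10 * a + ((c.toNat : Int) - 48)) 0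

-- float(s) for a str s, exact on the ASCII domain: strip whitespace, optional sign,
-- inf/infinity/nan case-insensitively, else Python's float-literal grammar
-- (digits with single '_' between digits, optional '.', optional exponent).
-- The effective decimal exponent is clamped far outside [-5000, 5000]; the clamp
-- never changes the two comparisons below (both values are then on the same side
-- of 2^-1075 and of 59 + 2^-48) and keeps the rational computable.
def pvFloatOfStr? (s : String) : Option PvPyFloat :=
  let cs := ((s.toList.dropWhile pvWsChar).reverse.dropWhile pvWsChar).reverse
  let (sgn, cs) := pvParseSign cs
  let low := cs.map PySem.Chars.lowerChar
  if low = "inf".toList ∨ low = "infinity".toList then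
    some (if sgn = 1 then .pinf else .ninf)
  else if low = "nan".toList then some .nan
  else
    let (r1, rest1) := cs.span (fun c => c.isDigit || c == '_')
    match pvCheckRun r1 with
    | none => none
    | some ip =>
      let step2 : Option (List Char × List Char) :=
        match rest1 with
        | '.' :: t =>
          let (r2, rest2) := t.span (fun c => c.isDigit || c == '_')
          (pvCheckRun r2).map (fun fp => (fp, rest2))
        | _ => some ([], rest1)
      match step2 with
      | none => none
      | some (fp, rest2) =>
        if ip = [] ∧ fp = [] then none
        else
          let expo : Option Int :=
            match rest2 with
            | [] => some 0
            | c :: t =>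
              if c == 'e' || c == 'E' then
                let (es, t') := pvParseSign t
                let (r3, rest3) := t'.span (fun c => c.isDigit || c == '_')
                match pvCheckRun r3 with
                | none => none
                | some ed => if ed = [] ∨ rest3 ≠ [] then none else some (es * pvDigitsVal ed)
              else none
          match expo with
          | none => none
          | some e =>
            let m : Int := pvDigitsVal (ip ++ fp)
            let E : Int := e - (fp.length : Int)
            let E := if 5000 < E then 5000
                     else if E < -5000 - ((ip ++ fp).length : Int) then -5000 - ((ip ++ fp).length : Int)
                     else E
            some (.fin ((sgn : ℚ) * (m : ℚ) * (10 : ℚ) ^ E))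

-- x <= 0 on the parsed float (RN(q) ≤ 0 ↔ q ≤ 2^-1075, tie rounds to even 0)
def pvFloatLe0 : PvPyFloat → Bool
  | .nan => false | .pinf => false | .ninf => true
  | .fin q => decide (q ≤ (2 : ℚ) ^ (-1075 : Int))

-- x < 0 or x > 59 on the parsed float (RN(q) < 0 ↔ q < -2^-1075; RN(q) > 59 ↔ q > 59 + 2^-48)
def pvFloatOut59 : PvPyFloat → Bool
  | .nan => false | .pinf => true | .ninf => true
  | .fin q => decide (q < -((2 : ℚ) ^ (-1075 : Int)) ∨ 59 + (2 : ℚ) ^ (-48 : Int) < q)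

-- ===== PORT A =====

-- one iteration of A's for-loop: the nome_ponto check then the five unrolled blocks
def pvBodyA (form : List (String × String)) (erros : List String) (i : Int) : List String :=
  let si := PySem.Int.toStr i
  let erros :=
    if PySem.Str.len (PySem.Str.strip (pvFget form ("nome_ponto_" ++ si))) == 0 then
      erros ++ ["O nome do ponto do lado " ++ si ++ " é obrigatório."]
    else erros
  let erros :=
    match pvFloatOfStr? (pvFget form ("distancia_" ++ si)) with
    | none => erros ++ ["Distância inválida no lado " ++ si ++ "."]
    | some d => if pvFloatLe0 d then erros ++ ["A distância do lado " ++ si ++ " deve ser maior que zero."] else erros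
  let erros :=
    match PySem.Int.ofStr? (pvFget form ("angulo_graus_" ++ si)) with
    | none => erros ++ ["Graus inválidos no lado " ++ si ++ "."]
    | some g => if decide (g < 0 ∨ 360 < g) then erros ++ ["Os graus do lado " ++ si ++ " devem estar entre 0 e 360."] else erros
  let erros :=
    match PySem.Int.ofStr? (pvFget form ("angulo_minutos_" ++ si)) with
    | none => erros ++ ["Minutos inválidos no lado " ++ si ++ "."]
    | some m => if decide (m < 0 ∨ 59 < m) then erros ++ ["Os minutos do lado " ++ si ++ " devem estar entre 0 e 59."] else erros
  match pvFloatOfStr? (pvFget form ("angulo_segundos_" ++ si)) with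
  | none => erros ++ ["Segundos inválidos no lado " ++ si ++ "."]
  | some sgs => if pvFloatOut59 sgs then erros ++ ["Os segundos do lado " ++ si ++ " devem estar entre 0 e 59."] else erros

def validar_lados_form (form : List (String × String)) (quantidade_lados : Int) : List String :=
  (PySem.List.pyRange 1 (quantidade_lados + 1) 1).foldl (pvBodyA form) []

-- ===== PORT B =====

-- _nome(form, i)
def pvColNome (form : List (String × String)) (i : Int) : Option String :=
  if PySem.Str.len (PySem.Str.strip (pvFget form ("nome_ponto_" ++ PySem.Int.toStr i))) == 0 then
    some ("O nome do ponto do lado " ++ PySem.Int.toStr i ++ " é obrigatório.")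
  else none

-- _dist(form, i)
def pvColDist (form : List (String × String)) (i : Int) : Option String :=
  match pvFloatOfStr? (pvFget form ("distancia_" ++ PySem.Int.toStr i)) with
  | none => some ("Distância inválida no lado " ++ PySem.Int.toStr i ++ ".")
  | some d => if pvFloatLe0 d then some ("A distância do lado " ++ PySem.Int.toStr i ++ " deve ser maior que zero.") else none

-- _graus(form, i)
def pvColGraus (form : List (String × String)) (i : Int) : Option String :=
  match PySem.Int.ofStr? (pvFget form ("angulo_graus_" ++ PySem.Int.toStr i)) with
  | none => some ("Graus inválidos no lado " ++ PySem.Int.toStr i ++ ".")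
  | some g => if decide (g < 0 ∨ 360 < g) then some ("Os graus do lado " ++ PySem.Int.toStr i ++ " devem estar entre 0 e 360.") else none

-- _minutos(form, i)
def pvColMinutos (form : List (String × String)) (i : Int) : Option String :=
  match PySem.Int.ofStr? (pvFget form ("angulo_minutos_" ++ PySem.Int.toStr i)) with
  | none => some ("Minutos inválidos no lado " ++ PySem.Int.toStr i ++ ".")
  | some m => if decide (m < 0 ∨ 59 < m) then some ("Os minutos do lado " ++ PySem.Int.toStr i ++ " devem estar entre 0 e 59.") else none

-- _segundos(form, i)
def pvColSegundos (form : List (String × String)) (i : Int) : Option String :=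
  match pvFloatOfStr? (pvFget form ("angulo_segundos_" ++ PySem.Int.toStr i)) with
  | none => some ("Segundos inválidos no lado " ++ PySem.Int.toStr i ++ ".")
  | some s => if pvFloatOut59 s then some ("Os segundos do lado " ++ PySem.Int.toStr i ++ " devem estar entre 0 e 59.") else none

-- the 'for row in zip(*cols): erros.extend(m for m in row if m is not None)' loop:
-- transpose the five columns and flatten the 5-tuples, dropping the Nones
def pvZipRows : List (Option String) → List (Option String) → List (Option String) →
    List (Option String) → List (Option String) → List String
  | a :: as_, b :: bs, c :: cs, d :: ds, e :: es =>
      List.filterMap id [a, b, c, d, e] ++ pvZipRows as_ bs cs ds es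
  | _, _, _, _, _ => []

def validar_lados_form_alt (form : List (String × String)) (quantidade_lados : Int) : List String :=
  let sides := PySem.List.pyRange 1 (quantidade_lados + 1) 1
  pvZipRows (sides.map (pvColNome form)) (sides.map (pvColDist form))
    (sides.map (pvColGraus form)) (sides.map (pvColMinutos form))
    (sides.map (pvColSegundos form))

-- ===== PRECONDITION & SPEC =====
def Spec_validar_lados_form (form : List (String × String)) (quantidade_lados : Int) (out : List String) : Prop := out = validar_lados_form_alt form quantidade_lados
instance (form : List (String × String)) (quantidade_lados : Int) (out : List String) : Decidable (Spec_validar_lados_form form quantidade_lados out) := by unfold Spec_validar_lados_form; infer_instance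

-- ===== CLAIM (what is proved, stated in full; the proofs are below) =====
def Claim_equal_validar_lados_form : Prop := ∀ (form : List (String × String)) (quantidade_lados : Int), Dom_validar_lados_form form quantidade_lados → Spec_validar_lados_form form quantidade_lados (validar_lados_form form quantidade_lados)

-- ===== LEMMAS AND PROOFS =====

-- proof-only helper: the errors one side contributes (row of the transposed grid)
def pvPerSide (form : List (String × String)) (i : Int) : List String :=
  List.filterMap id
    [pvColNome form i, pvColDist form i, pvColGraus form i, pvColMinutos form i, pvColSegundos form i]

-- A's loop body appends exactly one side's row of messages
set_option maxHeartbeats 4000000 in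
theorem pvBodyA_eq_perSide (form : List (String × String)) (erros : List String) (i : Int) :
    pvBodyA form erros i = erros ++ pvPerSide form i := by
  simp only [pvBodyA, pvPerSide, pvColNome, pvColDist, pvColGraus, pvColMinutos, pvColSegundos]
  by_cases h1 : (PySem.Str.len (PySem.Str.strip (pvFget form ("nome_ponto_" ++ PySem.Int.toStr i))) == 0) = true <;>
    cases pvFloatOfStr? (pvFget form ("distancia_" ++ PySem.Int.toStr i)) <;>
    cases PySem.Int.ofStr? (pvFget form ("angulo_graus_" ++ PySem.Int.toStr i)) <;>
    cases PySem.Int.ofStr? (pvFget form ("angulo_minutos_" ++ PySem.Int.toStr i)) <;>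
    cases pvFloatOfStr? (pvFget form ("angulo_segundos_" ++ PySem.Int.toStr i)) <;>
    simp only [h1, if_true, if_false, Bool.false_eq_true, List.append_assoc] <;>
    (try split_ifs) <;> simp [List.filterMap]

-- transposing the five mapped columns and flattening equals flat-mapping the rows
theorem pvZipRows_map (form : List (String × String)) (l : List Int) :
    pvZipRows (l.map (pvColNome form)) (l.map (pvColDist form)) (l.map (pvColGraus form))
      (l.map (pvColMinutos form)) (l.map (pvColSegundos form)) = l.flatMap (pvPerSide form) := by
  induction l with
  | nil => rfl
  | cons x t ih => simp [pvZipRows, pvPerSide, ih]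

-- ===== VERDICT (by name: the statement is the Claim_ definition above) =====
theorem validar_lados_form_spec : Claim_equal_validar_lados_form := by
  intro form quantidade_lados _
  unfold Spec_validar_lados_form validar_lados_form validar_lados_form_alt
  have h1 : (PySem.List.pyRange 1 (quantidade_lados + 1) 1).foldl (pvBodyA form) [] =
      (PySem.List.pyRange 1 (quantidade_lados + 1) 1).foldl (fun acc i => acc ++ pvPerSide form i) [] :=
    PySem.List.foldl_congr_mem _ (pvBodyA form) (fun acc i => acc ++ pvPerSide form i) []
      (fun acc x _ => pvBodyA_eq_perSide form acc x)
  rw [h1, PySem.List.foldl_append_eq_flatMap]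
  simp [pvZipRows_map]
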